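-- pv_equiv track=rewrite | github.com/vrvs/API | untagged/ranker/ranking.py | allCovers
-- ===== SOURCE A (Python) =====
-- def removeDuplicates(query):
--     result = []
--     for q in query:
--        if q not in result:
--            result.append(q)
--     return result
--
-- def getList(query,invertedFile):
--     query = removeDuplicates(query)
--     result = []
--     for q in query:
--         l1 = map(lambda x: [x,q], invertedFile.get(q,[]))
--         for l in l1:
--             result.append(l)
--     result = sorted(result)
--     return result
--
-- def allCovers(query,invertedFile):
--     i = 0
--     j = 0
--     l1 = getList(query, invertedFile)
--     result = []
--     query = removeDuplicates(query)
--     elements = []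
--     s = range(j,len(l1))
--     for k in s:
--         elements.append(l1[k][1])
--         if isCovered(elements,query):
--             while isCovered(elements,query):
--                 elements.remove(l1[i][1])
--                 i += 1
--             i -= 1
--             elements.append(l1[i][1])
--             if(isCovered(elements,query)):
--                 result.append([l1[i][0],l1[k][0]])
--             elements.remove(l1[i][1])
--             i += 1
--     return result
--
-- def isCovered(elements,query):
--     elements = removeDuplicates(elements)
--     query = sorted(query)
--     elements = sorted(elements)
--     return query == elements
-- ===== SOURCE B (Python) =====
-- def allCovers(query, invertedFile):
--     # distinct query terms, first-occurrence order is irrelevant for the result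
--     terms = list(dict.fromkeys(query))
--     pairs = sorted([pos, t] for t in terms for pos in invertedFile.get(t, []))
--     need = len(terms)
--     cnt = {}
--     have = 0
--     i = 0
--     result = []
--     for pos, t in pairs:
--         cnt[t] = cnt.get(t, 0) + 1
--         if cnt[t] == 1:
--             have += 1
--         if have == need:
--             # shrink from the left while still covered
--             while have == need:
--                 lt = pairs[i][1]
--                 cnt[lt] -= 1
--                 if cnt[lt] == 0:
--                     have -= 1
--                 i += 1
--             i -= 1
--             result.append([pairs[i][0], pos])
--             # window [i+1 .. k] is the state the next step continues from
--             i += 1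
--     return result
-- ===== Notes on version B (the rewrite author's own statement) =====
-- stated objective: faster
-- what changed: Replaced the per-step isCovered checks (dedup + two sorts over the window, plus list.remove scans) by a standard sliding window that keeps a per-term occurrence counter and a count of satisfied query terms, so coverage tests and window shrinks are O(1) amortized.
import Mathlib
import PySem

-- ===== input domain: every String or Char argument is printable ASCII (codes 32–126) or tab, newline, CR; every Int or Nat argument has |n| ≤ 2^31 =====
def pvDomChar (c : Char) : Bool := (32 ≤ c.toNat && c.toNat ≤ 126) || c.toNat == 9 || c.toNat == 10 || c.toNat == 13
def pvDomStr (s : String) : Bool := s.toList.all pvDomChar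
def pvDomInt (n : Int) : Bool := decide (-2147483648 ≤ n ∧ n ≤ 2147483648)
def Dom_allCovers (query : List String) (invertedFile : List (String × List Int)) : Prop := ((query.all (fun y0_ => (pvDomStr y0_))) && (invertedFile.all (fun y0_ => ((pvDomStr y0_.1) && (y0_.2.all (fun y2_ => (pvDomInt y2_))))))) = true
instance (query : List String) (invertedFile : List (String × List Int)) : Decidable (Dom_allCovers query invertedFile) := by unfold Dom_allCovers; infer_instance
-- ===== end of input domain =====

-- B replaces A's per-step isCovered checks (dedup + sorts over the window, plus list.remove scans)
-- by a sliding window with a per-term occurrence counter and a satisfied-term count (objective: faster).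

-- ===== PORT A =====
def removeDuplicatesA (query : List String) : List String :=
  query.foldl (fun result q => if result.contains q then result else result ++ [q]) []

def isCoveredA (elements : List String) (query : List String) : Bool :=
  PySem.List.sorted query (fun x => x) false
    == PySem.List.sorted (removeDuplicatesA elements) (fun x => x) false

def getListA (query : List String) (invertedFile : List (String × List Int)) : List (Int × String) :=
  let q2 := removeDuplicatesA query
  let result := q2.foldl
    (fun result q => result ++ (PySem.Dict.getD (PySem.Dict.mk invertedFile) q []).map (fun x => (x, q))) []
  PySem.List.sorted2 result Prod.fst Prod.snd

-- the inner 'while isCovered(...)'; fuel = len(elements) suffices (each iteration removes one element);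
-- the 'none' fall-backs are where Python would raise (unreachable in A's reachable states)
def whileA (l1 : List (Int × String)) (query : List String) :
    Nat → Int → List String → Int × List String
  | 0, i, elements => (i, elements)
  | fuel + 1, i, elements =>
    if isCoveredA elements query then
      let t := ((PySem.List.pyGet? l1 i).getD (0, "")).2
      match PySem.List.remove? elements t with
      | some e2 => whileA l1 query fuel (i + 1) e2
      | none => (i, elements)
    else (i, elements)

def stepA (l1 : List (Int × String)) (q2 : List String)
    (st : Int × List String × List (List Int)) (k : Int) : Int × List String × List (List Int) :=
  match st with
  | (i, elements, result) =>
    let pk := (PySem.List.pyGet? l1 k).getD (0, "")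
    let elements := elements ++ [pk.2]
    if isCoveredA elements q2 then
      let p := whileA l1 q2 elements.length i elements
      let i := p.1 - 1
      let elements := p.2
      let pi := (PySem.List.pyGet? l1 i).getD (0, "")
      let elements := elements ++ [pi.2]
      let result := if isCoveredA elements q2 then result ++ [[pi.1, pk.1]] else result
      let elements := (PySem.List.remove? elements pi.2).getD elements
      (i + 1, elements, result)
    else (i, elements, result)

def allCovers (query : List String) (invertedFile : List (String × List Int)) : List (List Int) :=
  let l1 := getListA query invertedFile
  let q2 := removeDuplicatesA query
  ((PySem.List.pyRange 0 (l1.length : Int) 1).foldl (stepA l1 q2) (0, [], [])).2.2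

-- ===== PORT B =====
def whileB (pairs : List (Int × String)) (need : Int) :
    Nat → PySem.Dict String Int → Int → Int → PySem.Dict String Int × Int × Int
  | 0, cnt, hv, i => (cnt, hv, i)
  | fuel + 1, cnt, hv, i =>
    if hv == need then
      let lt := ((PySem.List.pyGet? pairs i).getD (0, "")).2
      let cnt := cnt.insert lt (cnt.getD lt 0 - 1)
      let hv := if cnt.getD lt 0 == 0 then hv - 1 else hv
      whileB pairs need fuel cnt hv (i + 1)
    else (cnt, hv, i)

def stepB (pairs : List (Int × String)) (need : Int)
    (st : PySem.Dict String Int × Int × Int × List (List Int)) (p : Int × String) :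
    PySem.Dict String Int × Int × Int × List (List Int) :=
  match st with
  | (cnt, hv, i, result) =>
    let cnt := cnt.insert p.2 (cnt.getD p.2 0 + 1)
    let hv := if cnt.getD p.2 0 == 1 then hv + 1 else hv
    if hv == need then
      let w := whileB pairs need pairs.length cnt hv i
      let cnt := w.1
      let hv := w.2.1
      let i := w.2.2 - 1
      let result := result ++ [[((PySem.List.pyGet? pairs i).getD (0, "")).1, p.1]]
      (cnt, hv, i + 1, result)
    else (cnt, hv, i, result)

def allCovers_alt (query : List String) (invertedFile : List (String × List Int)) : List (List Int) :=
  let terms := PySem.List.dedup query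
  let pairs := PySem.List.sorted2
    (terms.flatMap (fun t => (PySem.Dict.getD (PySem.Dict.mk invertedFile) t []).map (fun pos => (pos, t))))
    Prod.fst Prod.snd
  (pairs.foldl (stepB pairs (terms.length : Int)) (PySem.Dict.empty, 0, 0, [])).2.2.2

-- ===== PRECONDITION & SPEC =====
def Spec_allCovers (query : List String) (invertedFile : List (String × List Int)) (out : List (List Int)) : Prop := out = allCovers_alt query invertedFile
instance (query : List String) (invertedFile : List (String × List Int)) (out : List (List Int)) : Decidable (Spec_allCovers query invertedFile out) := by unfold Spec_allCovers; infer_instance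

-- ===== CLAIM (what is proved, stated in full; the proofs are below) =====
def Claim_equal_allCovers : Prop := ∀ (query : List String) (invertedFile : List (String × List Int)), Dom_allCovers query invertedFile → Spec_allCovers query invertedFile (allCovers query invertedFile)

-- ===== LEMMAS AND PROOFS =====

-- proof-side abbreviations
def CovT (T E : List String) : Prop := ∀ t ∈ T, t ∈ E

def CntOf (E : List String) (cnt : PySem.Dict String Int) : Prop :=
  ∀ t : String, cnt.getD t 0 = (E.count t : Int)

def hvOf (T E : List String) : Int := (T.countP (fun s => decide (s ∈ E)) : Int)

theorem removeDuplicatesA_eq_dedup (xs : List String) :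
    removeDuplicatesA xs = PySem.List.dedup xs := rfl

theorem isCoveredA_eq_true_iff (T E : List String) (hT : T.Nodup) (hE : ∀ s ∈ E, s ∈ T) :
    (isCoveredA E T = true) ↔ CovT T E := by
  unfold isCoveredA
  rw [beq_iff_eq, PySem.List.sorted_id_eq_sorted_id_iff_perm, removeDuplicatesA_eq_dedup,
    List.perm_ext_iff_of_nodup hT (PySem.List.nodup_dedup E)]
  constructor
  · intro h t ht
    exact (PySem.List.mem_dedup E t).1 ((h t).1 ht)
  · intro h t
    constructor
    · intro ht; exact (PySem.List.mem_dedup E t).2 (h t ht)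
    · intro ht; exact hE t ((PySem.List.mem_dedup E t).1 ht)

theorem hv_eq_need_iff (T E : List String) :
    ((hvOf T E == (T.length : Int)) = true) ↔ CovT T E := by
  unfold hvOf CovT
  rw [beq_iff_eq, Int.natCast_inj, List.countP_eq_length]
  simp

theorem countP_shift (T : List String) (t : String) (p q : String → Bool)
    (hT : T.Nodup) (ht : t ∈ T) (hsame : ∀ x, x ≠ t → p x = q x) :
    T.countP p + (if q t then 1 else 0) = T.countP q + (if p t then 1 else 0) := by
  induction T with
  | nil => simp at ht
  | cons a T ih =>
    rw [List.nodup_cons] at hT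
    rcases List.mem_cons.1 ht with h | h
    · have hcong : T.countP p = T.countP q := by
        apply List.countP_congr
        intro x hx
        have hxt : x ≠ t := by rintro rfl; exact hT.1 (h ▸ hx)
        rw [hsame x hxt]
      rw [List.countP_cons, List.countP_cons, hcong, ← h]
      omega
    · have hat : a ≠ t := fun hh => hT.1 (hh ▸ h)
      rw [List.countP_cons, List.countP_cons, hsame a hat]
      have := ih hT.2 h
      omega

theorem hvOf_append (T E : List String) (t : String) (hT : T.Nodup) (ht : t ∈ T) :
    hvOf T (E ++ [t]) = hvOf T E + (if t ∈ E then 0 else 1) := by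
  have h := countP_shift T t (fun s => decide (s ∈ E ++ [t])) (fun s => decide (s ∈ E)) hT ht
    (by intro x hx; simp [List.mem_append, hx])
  simp only [List.mem_append, List.mem_singleton, or_true, decide_true, if_true] at h
  unfold hvOf
  by_cases hE : t ∈ E <;> simp [hE] at h ⊢ <;> omega

theorem hvOf_erase (T E : List String) (t : String) (hT : T.Nodup) (ht : t ∈ T) (htE : t ∈ E) :
    hvOf T (E.erase t) = hvOf T E - (if t ∈ E.erase t then 0 else 1) := by
  have h := countP_shift T t (fun s => decide (s ∈ E.erase t)) (fun s => decide (s ∈ E)) hT ht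
    (by intro x hx; simp [List.mem_erase_of_ne hx])
  simp only [htE, decide_true, if_true] at h
  unfold hvOf
  by_cases hE : t ∈ E.erase t <;> simp [hE] at h ⊢ <;> omega

theorem hvOf_perm (T : List String) {E E' : List String} (h : E.Perm E') :
    hvOf T E = hvOf T E' := by
  unfold hvOf
  congr 1
  apply List.countP_congr
  intro x _
  simp [h.mem_iff]

theorem cntOf_perm {E E' : List String} {cnt : PySem.Dict String Int}
    (h : E.Perm E') (hc : CntOf E cnt) : CntOf E' cnt := by
  intro t
  rw [hc t, h.count_eq]

-- the two inner while-loops advance in lockstep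
theorem while_sim (L : List (Int × String)) (T : List String)
    (hT : T.Nodup) (hTne : T ≠ []) (hL : ∀ p ∈ L, p.2 ∈ T) :
    ∀ (m : Nat), ∀ (j : Nat) (E : List String) (cnt : PySem.Dict String Int) (fa fb : Nat),
    m ≤ fa → m ≤ fb → j + m ≤ L.length →
    E.Perm (((L.drop j).take m).map Prod.snd) →
    (∀ s ∈ E, s ∈ T) →
    CntOf E cnt →
    ∃ (d : Nat) (E' : List String) (cnt' : PySem.Dict String Int),
      whileA L T fa (j : Int) E = (((j + d : Nat) : Int), E') ∧
      whileB L (T.length : Int) fb cnt (hvOf T E) (j : Int) = (cnt', hvOf T E', ((j + d : Nat) : Int)) ∧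
      d ≤ m ∧
      E'.Perm (((L.drop (j + d)).take (m - d)).map Prod.snd) ∧
      (∀ s ∈ E', s ∈ T) ∧
      CntOf E' cnt' ∧
      ¬ CovT T E' ∧
      (¬ CovT T E → d = 0 ∧ E' = E ∧ cnt' = cnt) ∧
      (CovT T E → ∃ hd : Int × String, 1 ≤ d ∧
        PySem.List.pyGet? L ((j + d - 1 : Nat) : Int) = some hd ∧
        CovT T (E' ++ [hd.2]) ∧
        (E' ++ [hd.2]).Perm (((L.drop (j + d - 1)).take (m - d + 1)).map Prod.snd)) := by
  intro m
  induction m with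
  | zero =>
    intro j E cnt fa fb hfa hfb hjm hperm hET hcnt
    -- E is empty, not covered (T nonempty)
    have hE : E = [] := by
      have hlen := hperm.length_eq
      simp only [List.length_map, List.length_take, List.length_drop] at hlen
      exact List.eq_nil_of_length_eq_zero (by omega)
    have hnc : ¬ CovT T E := by
      obtain ⟨t₀, ht₀⟩ := List.exists_mem_of_ne_nil T hTne
      intro h
      have := h t₀ ht₀
      simp [hE] at this
    have hcA : isCoveredA E T = false :=
      Bool.eq_false_iff.2 (fun h => hnc ((isCoveredA_eq_true_iff T E hT hET).1 h))
    have hcB : (hvOf T E == (T.length : Int)) = false :=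
      Bool.eq_false_iff.2 (fun h => hnc ((hv_eq_need_iff T E).1 h))
    refine ⟨0, E, cnt, ?_, ?_, by omega, by simpa using hperm, hET, hcnt, hnc,
      fun _ => ⟨rfl, rfl, rfl⟩, fun h => absurd h hnc⟩
    · cases fa with
      | zero => simp [whileA]
      | succ fa' => simp [whileA, hcA]
    · cases fb with
      | zero => simp [whileB]
      | succ fb' => simp [whileB, hcB]
  | succ m' ih =>
    intro j E cnt fa fb hfa hfb hjm hperm hET hcnt
    by_cases hc : CovT T E
    · -- covered: one step of both loops, then induction
      obtain ⟨fa', rfl⟩ : ∃ fa', fa = fa' + 1 := ⟨fa - 1, by omega⟩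
      obtain ⟨fb', rfl⟩ : ∃ fb', fb = fb' + 1 := ⟨fb - 1, by omega⟩
      have hjlt : j < L.length := by omega
      have hgetj : PySem.List.pyGet? L (j : Int) = some L[j] := by
        rw [PySem.List.pyGet?_natCast]
        exact List.getElem?_eq_getElem hjlt
      have hwin : (L.drop j).take (m' + 1) = L[j] :: ((L.drop (j + 1)).take m') := by
        rw [List.drop_eq_getElem_cons hjlt, List.take_succ_cons]
      have hperm' : E.Perm (L[j].2 :: ((L.drop (j + 1)).take m').map Prod.snd) := by
        rw [hwin] at hperm
        simpa using hperm
      have htmem : L[j].2 ∈ E := hperm'.mem_iff.2 (by simp)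
      have htT : L[j].2 ∈ T := hL L[j] (List.getElem_mem hjlt)
      have hremove : PySem.List.remove? E L[j].2 = some (E.erase L[j].2) :=
        PySem.List.remove?_eq_some_erase E _ htmem
      set E₂ := E.erase L[j].2 with hE₂
      have hperm₂ : E₂.Perm (((L.drop (j + 1)).take m').map Prod.snd) := by
        have := hperm'.erase L[j].2
        rwa [List.erase_cons_head] at this
      have hET₂ : ∀ s ∈ E₂, s ∈ T := fun s hs => hET s (List.mem_of_mem_erase hs)
      set cnt₂ := cnt.insert L[j].2 (cnt.getD L[j].2 0 - 1) with hcnt₂def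
      have hcnt₂ : CntOf E₂ cnt₂ := by
        intro t
        rw [hcnt₂def, PySem.Dict.getD_insert]
        by_cases hte : t = L[j].2
        · have h1 : 1 ≤ E.count L[j].2 := List.one_le_count_iff.2 htmem
          rw [if_pos hte, hcnt, hte, hE₂, List.count_erase_self]
          omega
        · rw [if_neg hte, hcnt t, hE₂, List.count_erase_of_ne hte]
      have hhv₂ : (if cnt₂.getD L[j].2 0 == 0 then hvOf T E - 1 else hvOf T E) = hvOf T E₂ := by
        rw [hcnt₂ L[j].2, hE₂, hvOf_erase T E L[j].2 hT htT htmem]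
        by_cases h0 : L[j].2 ∈ E.erase L[j].2
        · have h1 : 1 ≤ (E.erase L[j].2).count L[j].2 := List.one_le_count_iff.2 h0
          rw [List.count_erase_self] at h1
          simp only [h0, if_true]
          simp only [List.count_erase_self, beq_iff_eq, Int.natCast_eq_zero]
          split
          · omega
          · rfl
        · have hc0 : (E.erase L[j].2).count L[j].2 = 0 := List.count_eq_zero.2 h0
          simp [h0, hc0]
      -- A-side step
      have hcA : isCoveredA E T = true := (isCoveredA_eq_true_iff T E hT hET).2 hc
      have hcB : (hvOf T E == (T.length : Int)) = true := (hv_eq_need_iff T E).2 hc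
      have hstepA : whileA L T (fa' + 1) (j : Int) E = whileA L T fa' ((j : Int) + 1) E₂ := by
        simp only [whileA, hcA, if_true, hgetj, Option.getD_some, hremove]
      have hstepB : whileB L (T.length : Int) (fb' + 1) cnt (hvOf T E) (j : Int)
          = whileB L (T.length : Int) fb' cnt₂ (hvOf T E₂) ((j : Int) + 1) := by
        simp only [whileB, hcB, if_true, hgetj, Option.getD_some, ← hcnt₂def, hhv₂]
      obtain ⟨d', E', cnt', hA, hB, hd'm, hperm'', hET', hcnt', hnc', hzero, hcov⟩ :=
        ih (j + 1) E₂ cnt₂ fa' fb' (by omega) (by omega) (by omega) hperm₂ hET₂ hcnt₂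
      have hcast : ((j : Int) + 1) = ((j + 1 : Nat) : Int) := by push_cast; ring
      refine ⟨d' + 1, E', cnt', ?_, ?_, by omega, ?_, hET', hcnt', hnc', fun h => absurd hc h, ?_⟩
      · rw [hstepA, hcast, hA]
        have h1 : j + 1 + d' = j + (d' + 1) := by omega
        rw [h1]
      · rw [hstepB, hcast, hB]
        have h1 : j + 1 + d' = j + (d' + 1) := by omega
        rw [h1]
      · have : j + (d' + 1) = (j + 1) + d' := by omega
        rw [this]
        have : m' + 1 - (d' + 1) = m' - d' := by omega
        rw [this]
        exact hperm''
      · intro _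
        by_cases hc₂ : CovT T E₂
        · obtain ⟨hd, hd1, hget, hcov', hperm₃⟩ := hcov hc₂
          refine ⟨hd, by omega, ?_, hcov', ?_⟩
          · have : j + (d' + 1) - 1 = (j + 1) + d' - 1 := by omega
            rw [this]; exact hget
          · have h1 : j + (d' + 1) - 1 = (j + 1) + d' - 1 := by omega
            have h2 : m' + 1 - (d' + 1) + 1 = m' - d' + 1 := by omega
            rw [h1, h2]; exact hperm₃
        · obtain ⟨hd0, hEeq, hceq⟩ := hzero hc₂
          subst hd0
          refine ⟨L[j], by omega, ?_, ?_, ?_⟩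
          · have : j + (0 + 1) - 1 = j := by omega
            rw [this]; exact hgetj
          · intro t ht
            rcases List.mem_cons.1 (hperm'.mem_iff.1 (hc t ht)) with h | h
            · simp [hEeq, h]
            · have h2 : t ∈ E₂ := hperm₂.mem_iff.2 h
              rw [hEeq]
              simp [h2]
          · have h1 : j + (0 + 1) - 1 = j := by omega
            have h2 : m' + 1 - (0 + 1) + 1 = m' + 1 := by omega
            rw [h1, h2, hEeq]
            exact (List.perm_append_comm.trans (List.perm_cons_erase htmem).symm).trans hperm
    · -- not covered: both loops stop immediately
      have hcA : isCoveredA E T = false :=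
        Bool.eq_false_iff.2 (fun h => hc ((isCoveredA_eq_true_iff T E hT hET).1 h))
      have hcB : (hvOf T E == (T.length : Int)) = false :=
        Bool.eq_false_iff.2 (fun h => hc ((hv_eq_need_iff T E).1 h))
      refine ⟨0, E, cnt, ?_, ?_, by omega, by simpa using hperm, hET, hcnt, hc,
        fun _ => ⟨rfl, rfl, rfl⟩, fun h => absurd h hc⟩
      · cases fa with
        | zero => simp [whileA]
        | succ fa' => simp [whileA, hcA]
      · cases fb with
        | zero => simp [whileB]
        | succ fb' => simp [whileB, hcB]

-- the two outer loops advance in lockstep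
theorem outer_sim (L : List (Int × String)) (T : List String)
    (hT : T.Nodup) (hTne : T ≠ []) (hL : ∀ p ∈ L, p.2 ∈ T) :
    ∀ (ks : Nat), ∀ (k j : Nat) (E : List String) (cnt : PySem.Dict String Int) (res : List (List Int)),
    k + ks = L.length → j ≤ k →
    E.Perm (((L.drop j).take (k - j)).map Prod.snd) →
    (∀ s ∈ E, s ∈ T) → CntOf E cnt →
    ((PySem.List.pyRange (k : Int) (L.length : Int) 1).foldl (stepA L T) ((j : Int), E, res)).2.2
      = ((L.drop k).foldl (stepB L (T.length : Int)) (cnt, hvOf T E, (j : Int), res)).2.2.2 := by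
  intro ks
  induction ks with
  | zero =>
    intro k j E cnt res hk hj hperm hET hcnt
    rw [PySem.List.pyRange_one_eq_nil (by omega : (L.length : Int) ≤ (k : Int)),
      List.drop_eq_nil_of_le (by omega)]
    simp
  | succ ks' ih =>
    intro k j E cnt res hk hj hperm hET hcnt
    have hklt : k < L.length := by omega
    have hgetk : PySem.List.pyGet? L (k : Int) = some L[k] := by
      rw [PySem.List.pyGet?_natCast]
      exact List.getElem?_eq_getElem hklt
    have htk : L[k].2 ∈ T := hL L[k] (List.getElem_mem hklt)
    set E₁ := E ++ [L[k].2] with hE₁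
    set cnt₁ := cnt.insert L[k].2 (cnt.getD L[k].2 0 + 1) with hcnt₁def
    have hwink : (L.drop j).take (k + 1 - j) = (L.drop j).take (k - j) ++ [L[k]] := by
      have h1 : k + 1 - j = (k - j) + 1 := by omega
      rw [h1, List.take_add_one]
      have h2 : (L.drop j)[k - j]? = some L[k] := by
        rw [List.getElem?_drop]
        have h3 : j + (k - j) = k := by omega
        rw [h3]
        exact List.getElem?_eq_getElem hklt
      rw [h2]
      rfl
    have hperm₁ : E₁.Perm (((L.drop j).take (k + 1 - j)).map Prod.snd) := by
      rw [hwink, List.map_append]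
      exact hperm.append_right _
    have hET₁ : ∀ s ∈ E₁, s ∈ T := by
      intro s hs
      rcases List.mem_append.1 hs with h | h
      · exact hET s h
      · simp at h; rw [h]; exact htk
    have hcnt₁ : CntOf E₁ cnt₁ := by
      intro t
      rw [hcnt₁def, PySem.Dict.getD_insert, hE₁, List.count_append]
      by_cases hte : t = L[k].2
      · rw [if_pos hte, hcnt, hte]
        simp
      · rw [if_neg hte, hcnt t]
        have : [L[k].2].count t = 0 := List.count_eq_zero.2 (by simp [hte])
        rw [this]
        simp
    have hv₁ : (if cnt₁.getD L[k].2 0 == 1 then hvOf T E + 1 else hvOf T E) = hvOf T E₁ := by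
      rw [hcnt₁ L[k].2, hE₁, hvOf_append T E L[k].2 hT htk, List.count_append]
      by_cases h0 : L[k].2 ∈ E
      · have h1 : 1 ≤ E.count L[k].2 := List.one_le_count_iff.2 h0
        have h2 : ((E.count L[k].2 + [L[k].2].count L[k].2 : Nat) : Int) ≠ 1 := by
          simp [List.count_singleton]
          omega
        simp only [beq_iff_eq]
        rw [if_neg h2, if_pos h0]
        omega
      · have h1 : E.count L[k].2 = 0 := List.count_eq_zero.2 h0
        simp [h1, h0]
    by_cases hc : CovT T E₁
    · -- a cover is reached at index k: both loops shrink and record the same pair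
      have hlenE₁ : E₁.length = k + 1 - j := by
        have := hperm₁.length_eq
        simp only [List.length_map, List.length_take, List.length_drop] at this
        omega
      obtain ⟨d, E', cnt', hA, hB, hdm, hperm', hET', hcnt', hnc', _, hcov⟩ :=
        while_sim L T hT hTne hL (k + 1 - j) j E₁ cnt₁ E₁.length L.length
          (by omega) (by omega) (by omega) hperm₁ hET₁ hcnt₁
      obtain ⟨hd, hd1, hget', hcovhd, hpermhd⟩ := hcov hc
      have hdT : hd.2 ∈ T := hL hd (PySem.List.mem_of_pyGet?_eq_some L hget')
      have hcA₂ : isCoveredA (E' ++ [hd.2]) T = true := by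
        apply (isCoveredA_eq_true_iff T _ hT ?_).2 hcovhd
        intro s hs
        rcases List.mem_append.1 hs with h | h
        · exact hET' s h
        · simp at h; rw [h]; exact hdT
      have hremove₂ : PySem.List.remove? (E' ++ [hd.2]) hd.2 = some ((E' ++ [hd.2]).erase hd.2) :=
        PySem.List.remove?_eq_some_erase _ _ (by simp)
      have hcasti : ((j + d : Nat) : Int) - 1 = ((j + d - 1 : Nat) : Int) := by push_cast [hd1]; omega
      have hpermE₃ : ((E' ++ [hd.2]).erase hd.2).Perm E' := by
        have h1 : (E' ++ [hd.2]).Perm (hd.2 :: E') := List.perm_append_comm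
        have h2 := h1.erase hd.2
        rwa [List.erase_cons_head] at h2
      have hcA₁ : isCoveredA E₁ T = true := (isCoveredA_eq_true_iff T E₁ hT hET₁).2 hc
      have hsA : stepA L T ((j : Int), E, res) (k : Int)
          = (((j + d : Nat) : Int), (E' ++ [hd.2]).erase hd.2, res ++ [[hd.1, L[k].1]]) := by
        simp only [stepA, hgetk, Option.getD_some, ← hE₁, hcA₁, if_true, hA, hcasti, hget',
          hremove₂, hcA₂]
        have hh : ((j + d - 1 : Nat) : Int) + 1 = ((j + d : Nat) : Int) := by omega
        rw [hh]
      have hcB₁ : (hvOf T E₁ == (T.length : Int)) = true := (hv_eq_need_iff T E₁).2 hc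
      have hsB : stepB L (T.length : Int) (cnt, hvOf T E, (j : Int), res) L[k]
          = (cnt', hvOf T E', ((j + d : Nat) : Int), res ++ [[hd.1, L[k].1]]) := by
        simp only [stepB, ← hcnt₁def, hv₁, hcB₁, if_true, hB, hcasti, hget', Option.getD_some]
        have hh : ((j + d - 1 : Nat) : Int) + 1 = ((j + d : Nat) : Int) := by omega
        rw [hh]
      rw [PySem.List.pyRange_one_cons (by exact_mod_cast hklt),
        List.drop_eq_getElem_cons hklt, List.foldl_cons, List.foldl_cons, hsA, hsB]
      have hperm₃ : ((E' ++ [hd.2]).erase hd.2).Perm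
          (((L.drop (j + d)).take ((k + 1) - (j + d))).map Prod.snd) := by
        have h1 : (k + 1) - (j + d) = (k + 1 - j) - d := by omega
        rw [h1]
        exact hpermE₃.trans hperm'
      have hcast2 : (k : Int) + 1 = ((k + 1 : Nat) : Int) := by push_cast; ring
      have hhv3 : hvOf T E' = hvOf T ((E' ++ [hd.2]).erase hd.2) := (hvOf_perm T hpermE₃).symm
      rw [hcast2, hhv3]
      exact ih (k + 1) (j + d) ((E' ++ [hd.2]).erase hd.2) cnt' (res ++ [[hd.1, L[k].1]])
        (by omega) (by omega) hperm₃
        (fun s hs => hET' s (hpermE₃.mem_iff.1 hs))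
        (cntOf_perm hpermE₃.symm hcnt')
    · -- no cover yet: both loops just extend the window
      have hcA₁ : isCoveredA E₁ T = false :=
        Bool.eq_false_iff.2 (fun h => hc ((isCoveredA_eq_true_iff T E₁ hT hET₁).1 h))
      have hcB₁ : (hvOf T E₁ == (T.length : Int)) = false :=
        Bool.eq_false_iff.2 (fun h => hc ((hv_eq_need_iff T E₁).1 h))
      have hsA : stepA L T ((j : Int), E, res) (k : Int) = ((j : Int), E₁, res) := by
        simp only [stepA, hgetk, Option.getD_some, ← hE₁, hcA₁]
        simp
      have hsB : stepB L (T.length : Int) (cnt, hvOf T E, (j : Int), res) L[k]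
          = (cnt₁, hvOf T E₁, (j : Int), res) := by
        simp only [stepB, ← hcnt₁def, hv₁, hcB₁]
        simp
      rw [PySem.List.pyRange_one_cons (by exact_mod_cast hklt),
        List.drop_eq_getElem_cons hklt, List.foldl_cons, List.foldl_cons, hsA, hsB]
      have hcast2 : (k : Int) + 1 = ((k + 1 : Nat) : Int) := by push_cast; ring
      rw [hcast2]
      exact ih (k + 1) j E₁ cnt₁ res (by omega) (by omega) hperm₁ hET₁ hcnt₁

theorem pairs_eq (query : List String) (inv : List (String × List Int)) :
    getListA query inv = PySem.List.sorted2
      ((PySem.List.dedup query).flatMap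
        (fun t => (PySem.Dict.getD (PySem.Dict.mk inv) t []).map (fun pos => (pos, t))))
      Prod.fst Prod.snd := by
  show PySem.List.sorted2
      ((removeDuplicatesA query).foldl
        (fun result q => result ++ (PySem.Dict.getD (PySem.Dict.mk inv) q []).map (fun x => (x, q))) [])
      Prod.fst Prod.snd = _
  rw [removeDuplicatesA_eq_dedup, PySem.List.foldl_append_eq_flatMap, List.nil_append]

theorem hL_of (query : List String) (inv : List (String × List Int)) :
    ∀ p ∈ getListA query inv, p.2 ∈ PySem.List.dedup query := by
  intro p hp
  rw [pairs_eq] at hp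
  have hm := (PySem.List.sorted2_perm _ _ _ _).mem_iff.1 hp
  obtain ⟨t, ht, hpt⟩ := List.mem_flatMap.1 hm
  obtain ⟨pos, _, rfl⟩ := List.mem_map.1 hpt
  exact ht

theorem allCovers_eq_alt (query : List String) (inv : List (String × List Int)) :
    allCovers query inv = allCovers_alt query inv := by
  have eA : allCovers query inv
      = ((PySem.List.pyRange 0 ((getListA query inv).length : Int) 1).foldl
          (stepA (getListA query inv) (removeDuplicatesA query)) (0, [], [])).2.2 := rfl
  have eB : allCovers_alt query inv
      = ((PySem.List.sorted2
            ((PySem.List.dedup query).flatMap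
              (fun t => (PySem.Dict.getD (PySem.Dict.mk inv) t []).map (fun pos => (pos, t))))
            Prod.fst Prod.snd).foldl
          (stepB (PySem.List.sorted2
            ((PySem.List.dedup query).flatMap
              (fun t => (PySem.Dict.getD (PySem.Dict.mk inv) t []).map (fun pos => (pos, t))))
            Prod.fst Prod.snd) ((PySem.List.dedup query).length : Int))
          (PySem.Dict.empty, 0, 0, [])).2.2.2 := rfl
  rw [← pairs_eq query inv] at eB
  by_cases hq : query = []
  · subst hq; rfl
  · have hT : (PySem.List.dedup query).Nodup := PySem.List.nodup_dedup query
    have hTne : PySem.List.dedup query ≠ [] := by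
      cases query with
      | nil => exact absurd rfl hq
      | cons q qs =>
        exact List.ne_nil_of_mem ((PySem.List.mem_dedup _ q).2 (List.mem_cons_self))
    have hL := hL_of query inv
    have h := outer_sim (getListA query inv) (PySem.List.dedup query) hT hTne hL
      (getListA query inv).length 0 0 [] PySem.Dict.empty []
      (by omega) (le_refl 0) (by simp) (by intro s hs; simp at hs)
      (by intro t; simp [PySem.Dict.getD_empty])
    have hhv0 : hvOf (PySem.List.dedup query) [] = 0 := by simp [hvOf]
    simp only [Nat.cast_zero, List.drop_zero, hhv0] at h
    rw [eA, eB, removeDuplicatesA_eq_dedup]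
    exact h

-- ===== VERDICT (by name: the statement is the Claim_ definition above) =====
theorem allCovers_spec : Claim_equal_allCovers := by
  unfold Claim_equal_allCovers
  intro query invertedFile _
  unfold Spec_allCovers
  exact allCovers_eq_alt query invertedFile
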